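-- pv_equiv track=rewrite | github.com/Arctem/grader_assigner | schedule_grading.py | calculate_tslg
-- ===== SOURCE A (Python) =====
-- def calculate_tslg(assignments, history, graders, students):
--     counter = 1
--     tslg = {}
--     for grader in graders:
--         tslg[grader] = {}
--     assignments = assignments[::-1]
--     for assignment in assignments:
--         data = history[assignment]
--
--         for grader in data:
--             for student in data[grader]:
--                 if student not in tslg[grader]:
--                     tslg[grader][student] = counter
--
--         counter += 1
--
--     for grader in graders:
--         for student in students:
--             if student not in tslg[grader].keys():
--                 tslg[grader][student] = counter + 1
--
--     return tslg
-- ===== SOURCE B (Python) =====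
-- def calculate_tslg(assignments, history, graders, students):
--     n = len(assignments)
--
--     def row(g):
--         inner = {}
--         for j, assignment in enumerate(reversed(assignments)):
--             for student in history[assignment].get(g, []):
--                 inner.setdefault(student, j + 1)
--         for student in students:
--             inner.setdefault(student, n + 2)
--         return inner
--
--     return {g: row(g) for g in graders}
-- ===== Notes on version B (the rewrite author's own statement) =====
-- stated objective: alternative
-- what changed: B is grader-major: each grader's row is computed independently by one pass over enumerate(reversed(assignments)) using setdefault with the closed-form counter j+1 (default n+2), assembled by a dict comprehension, instead of A's assignment-major in-place mutation of a dict-of-dicts with a running counter and 'not in' guards.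
import Mathlib
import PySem

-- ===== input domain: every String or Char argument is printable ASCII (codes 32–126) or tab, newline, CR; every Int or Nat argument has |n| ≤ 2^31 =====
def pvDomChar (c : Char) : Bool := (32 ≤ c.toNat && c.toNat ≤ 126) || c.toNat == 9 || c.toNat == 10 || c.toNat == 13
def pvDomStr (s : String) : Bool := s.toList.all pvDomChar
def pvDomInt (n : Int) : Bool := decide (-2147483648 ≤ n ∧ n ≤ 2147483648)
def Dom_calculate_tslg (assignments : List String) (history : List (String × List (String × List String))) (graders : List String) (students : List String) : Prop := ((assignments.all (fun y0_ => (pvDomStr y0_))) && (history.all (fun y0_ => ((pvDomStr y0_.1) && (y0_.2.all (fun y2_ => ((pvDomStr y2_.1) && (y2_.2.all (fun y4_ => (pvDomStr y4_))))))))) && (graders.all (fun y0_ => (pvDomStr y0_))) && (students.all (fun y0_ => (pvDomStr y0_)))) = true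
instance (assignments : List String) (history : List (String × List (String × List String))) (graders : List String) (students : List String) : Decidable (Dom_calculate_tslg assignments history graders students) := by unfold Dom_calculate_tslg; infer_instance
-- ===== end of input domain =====

-- B is a grader-major re-decomposition of A (per-grader rows built independently with setdefault
-- and a closed-form counter); same cost, objective 'alternative'. Equivalence is about the return
-- value (A mutates only its own local dicts).

-- ===== PORT A =====
-- A's two update loops ('for student in …: if student not in tslg[grader]: tslg[grader][student] = v')
-- have the identical Python shape; this helper is that shape, used for both.
def pvUpdA (v : Int) (t : PySem.Dict String (PySem.Dict String Int)) (p : String × List String) :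
    PySem.Dict String (PySem.Dict String Int) :=
  p.2.foldl (fun t s =>
    let inner := t.getD p.1 PySem.Dict.empty   -- tslg[grader] (Python raises if absent: outside Pre_)
    if inner.contains s then t else t.insert p.1 (inner.insert s v)) t

def calculate_tslg (assignments : List String) (history : List (String × List (String × List String))) (graders : List String) (students : List String) : List (String × List (String × Int)) :=
  -- counter = 1; tslg = {}; for grader in graders: tslg[grader] = {}
  let tslg0 : PySem.Dict String (PySem.Dict String Int) :=
    graders.foldl (fun t g => t.insert g PySem.Dict.empty) PySem.Dict.empty
  -- assignments = assignments[::-1]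
  let rev := (PySem.List.slice? assignments none none (-1)).getD []
  -- main loop, state (tslg, counter); data = history[assignment] (raises if absent: outside Pre_)
  let st := rev.foldl
    (fun (st : PySem.Dict String (PySem.Dict String Int) × Int) a =>
      let data := ((PySem.Dict.mk history).get? a).getD []
      (data.foldl (pvUpdA st.2) st.1, st.2 + 1)) (tslg0, (1 : Int))
  -- default loop: same statement shape as the main inner loops, value counter + 1
  let tslg2 := graders.foldl (fun t g => pvUpdA (st.2 + 1) t (g, students)) st.1
  tslg2.items.map (fun p => (p.1, p.2.items))

-- ===== PORT B =====
-- history[assignment].get(g, [])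
def pvListOf (history : List (String × List (String × List String))) (a g : String) : List String :=
  ((PySem.Dict.mk (((PySem.Dict.mk history).get? a).getD [])).get? g).getD []

-- def row(g): one independent pass per grader
def pvRow (assignments : List String) (history : List (String × List (String × List String))) (students : List String) (g : String) : List (String × Int) :=
  let n : Int := assignments.length
  let inner := (PySem.List.enumerate assignments.reverse 0).foldl
    (fun inner ja => (pvListOf history ja.2 g).foldl (fun inn s => inn.setdefault s (ja.1 + 1)) inner)
    (PySem.Dict.empty : PySem.Dict String Int)
  let inner := students.foldl (fun inn s => inn.setdefault s (n + 2)) inner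
  inner.items

def calculate_tslg_alt (assignments : List String) (history : List (String × List (String × List String))) (graders : List String) (students : List String) : List (String × List (String × Int)) :=
  (graders.foldl (fun d g => d.insert g (pvRow assignments history students g)) PySem.Dict.empty).items

-- ===== PRECONDITION & SPEC =====
-- Pre_ excludes exactly the inputs where Python A raises KeyError (an assignment missing from
-- history, or a grader with a non-empty student list occurring in a used assignment's history but
-- not in graders), and the association lists with duplicate inner keys, which do not represent any
-- Python dict (a Python dict cannot carry duplicate keys).
def Pre_calculate_tslg (assignments : List String) (history : List (String × List (String × List String))) (graders : List String) (students : List String) : Prop :=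
  (∀ a ∈ assignments, (PySem.Dict.mk history).contains a = true) ∧
  (∀ a ∈ assignments, ∀ p ∈ ((PySem.Dict.mk history).get? a).getD [], p.1 ∈ graders ∨ p.2 = ([] : List String)) ∧
  (∀ q ∈ history, (q.2.map Prod.fst).Nodup)
instance (assignments : List String) (history : List (String × List (String × List String))) (graders : List String) (students : List String) : Decidable (Pre_calculate_tslg assignments history graders students) := by unfold Pre_calculate_tslg; infer_instance

def pvWitness_calculate_tslg : List String × (List (String × List (String × List String))) × List String × List String :=
  (["hw1", "hw2"], [("hw1", [("g1", ["s1"])]), ("hw2", [("g1", ["s2"]), ("g2", ["s1", "s2"])])], ["g1", "g2"], ["s1", "s2", "s3"])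

def Spec_calculate_tslg (assignments : List String) (history : List (String × List (String × List String))) (graders : List String) (students : List String) (out : List (String × List (String × Int))) : Prop := out = calculate_tslg_alt assignments history graders students
instance (assignments : List String) (history : List (String × List (String × List String))) (graders : List String) (students : List String) (out : List (String × List (String × Int))) : Decidable (Spec_calculate_tslg assignments history graders students out) := by unfold Spec_calculate_tslg; infer_instance

-- ===== CLAIM (what is proved, stated in full; the proofs are below) =====
def Claim_equal_calculate_tslg : Prop := ∀ (assignments : List String) (history : List (String × List (String × List String))) (graders : List String) (students : List String), Dom_calculate_tslg assignments history graders students → Pre_calculate_tslg assignments history graders students → Spec_calculate_tslg assignments history graders students (calculate_tslg assignments history graders students)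

-- ===== LEMMAS AND PROOFS =====

-- projection of one of A's update loops at one grader key: it is B's setdefault pass there
lemma pv_getD_updA (v : Int) (t : PySem.Dict String (PySem.Dict String Int)) (k : String)
    (l : List String) (g : String) :
    (pvUpdA v t (k, l)).getD g PySem.Dict.empty =
      if g = k then l.foldl (fun inn s => inn.setdefault s v) (t.getD g PySem.Dict.empty)
      else t.getD g PySem.Dict.empty := by
  induction l generalizing t with
  | nil => simp [pvUpdA]
  | cons s l ih =>
    have hstep : pvUpdA v t (k, s :: l) =
        pvUpdA v (if (t.getD k PySem.Dict.empty).contains s then t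
          else t.insert k ((t.getD k PySem.Dict.empty).insert s v)) (k, l) := rfl
    rw [hstep, ih]
    by_cases hg : g = k
    · subst hg
      by_cases hc : (t.getD g PySem.Dict.empty).contains s
      · simp [hc, PySem.Dict.setdefault_of_contains _ _ hc]
      · simp [hc, PySem.Dict.setdefault_of_not_contains _ _ (by simpa using hc),
          PySem.Dict.getD_insert_self]
    · by_cases hc : (t.getD k PySem.Dict.empty).contains s
      · simp [hc, hg]
      · simp [hc, hg, PySem.Dict.getD_insert_of_ne _ _ _ hg]

-- projection of A's per-assignment loop over data: one setdefault pass over data[g] (first match)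
lemma pv_getD_dataFold (v : Int) (data : List (String × List String))
    (hnd : (data.map Prod.fst).Nodup)
    (t : PySem.Dict String (PySem.Dict String Int)) (g : String) :
    (data.foldl (pvUpdA v) t).getD g PySem.Dict.empty =
      (((PySem.Dict.mk data).get? g).getD []).foldl (fun inn s => inn.setdefault s v)
        (t.getD g PySem.Dict.empty) := by
  induction data generalizing t with
  | nil => simp [PySem.Dict.get?]
  | cons q rest ih =>
    obtain ⟨k, l⟩ := q
    simp only [List.map_cons, List.nodup_cons] at hnd
    rw [List.foldl_cons, ih hnd.2]
    by_cases hg : g = k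
    · subst hg
      have hnone : (PySem.Dict.mk rest).get? g = none := by
        rw [PySem.Dict.get?_eq_none_iff_not_mem_keys]
        simpa [PySem.Dict.keys] using hnd.1
      simp [hnone, PySem.Dict.get?_mk_cons, pv_getD_updA]
    · simp [PySem.Dict.get?_mk_cons, pv_getD_updA, hg, Ne.symm hg]

-- counter value after A's main loop
lemma pv_main_snd (history : List (String × List (String × List String))) (L : List String)
    (t : PySem.Dict String (PySem.Dict String Int)) (c : Int) :
    (L.foldl (fun (st : PySem.Dict String (PySem.Dict String Int) × Int) a =>
        ((((PySem.Dict.mk history).get? a).getD []).foldl (pvUpdA st.2) st.1, st.2 + 1)) (t, c)).2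
      = c + L.length := by
  induction L generalizing t c with
  | nil => simp
  | cons a L ih => rw [List.foldl_cons, ih]; push_cast [List.length_cons]; ring

-- projection of A's whole main loop at grader g: B's enumerate fold
lemma pv_getD_mainFold (history : List (String × List (String × List String)))
    (hh : ∀ q ∈ history, (q.2.map Prod.fst).Nodup)
    (L : List String) (c : Int) (t : PySem.Dict String (PySem.Dict String Int)) (g : String) :
    ((L.foldl (fun (st : PySem.Dict String (PySem.Dict String Int) × Int) a =>
        ((((PySem.Dict.mk history).get? a).getD []).foldl (pvUpdA st.2) st.1, st.2 + 1)) (t, c)).1).getD g PySem.Dict.empty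
      = (PySem.List.enumerate L (c - 1)).foldl
          (fun inn ja => (pvListOf history ja.2 g).foldl (fun i s => i.setdefault s (ja.1 + 1)) inn)
          (t.getD g PySem.Dict.empty) := by
  induction L generalizing t c with
  | nil => simp
  | cons a L ih =>
    have hdata : ((((PySem.Dict.mk history).get? a).getD []).map Prod.fst).Nodup := by
      cases hcase : (PySem.Dict.mk history).get? a with
      | none => simp
      | some d => exact hh (a, d) (PySem.Dict.mem_items_of_get?_eq_some _ hcase)
    rw [List.foldl_cons, PySem.List.enumerate_cons, List.foldl_cons, ih,
      pv_getD_dataFold _ _ hdata]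
    have h1 : c - 1 + 1 = c := by ring
    have h2 : c + 1 - 1 = c - 1 + 1 := by ring
    rw [h1, h2, h1]
    rfl

-- setdefault passes: contains is monotone, every visited key is present, a pass over present keys is a no-op
lemma pv_contains_pass (v : Int) (L : List String) (x : PySem.Dict String Int) (s0 : String)
    (h : x.contains s0 = true) :
    (L.foldl (fun inn s => inn.setdefault s v) x).contains s0 = true := by
  induction L generalizing x with
  | nil => exact h
  | cons s L ih => exact ih _ (by simp [PySem.Dict.contains_setdefault, h])

lemma pv_pass_contains_all (v : Int) (L : List String) (x : PySem.Dict String Int) :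
    ∀ s ∈ L, (L.foldl (fun inn s => inn.setdefault s v) x).contains s = true := by
  induction L generalizing x with
  | nil => simp
  | cons s L ih =>
    intro s' hs'
    rcases List.mem_cons.mp hs' with h | h
    · subst h
      exact pv_contains_pass v L _ s' (by simp [PySem.Dict.contains_setdefault])
    · exact ih _ s' h

lemma pv_pass_noop (v : Int) (L : List String) (x : PySem.Dict String Int)
    (h : ∀ s ∈ L, x.contains s = true) :
    L.foldl (fun inn s => inn.setdefault s v) x = x := by
  induction L generalizing x with
  | nil => rfl
  | cons s L ih =>
    rw [List.foldl_cons, PySem.Dict.setdefault_of_contains _ _ (h s (by simp))]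
    exact ih x (fun s' hs' => h s' (by simp [hs']))

-- projection of A's default loop at grader g
lemma pv_getD_defaultFold (v : Int) (students : List String) (gl : List String)
    (t : PySem.Dict String (PySem.Dict String Int)) (g : String) :
    (gl.foldl (fun t g' => pvUpdA v t (g', students)) t).getD g PySem.Dict.empty =
      if g ∈ gl then students.foldl (fun inn s => inn.setdefault s v) (t.getD g PySem.Dict.empty)
      else t.getD g PySem.Dict.empty := by
  induction gl generalizing t with
  | nil => simp
  | cons g' gl ih =>
    rw [List.foldl_cons, ih, pv_getD_updA]
    by_cases hg : g = g'
    · subst hg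
      by_cases hmem : g ∈ gl
      · simp [hmem, pv_pass_noop v students _ (pv_pass_contains_all v students _)]
      · simp [hmem]
    · simp [hg]

-- keys are preserved by the update loops whenever the touched grader is already a key
lemma pv_keys_updA (v : Int) (t : PySem.Dict String (PySem.Dict String Int)) (k : String)
    (l : List String) (h : l ≠ [] → k ∈ t.keys) : (pvUpdA v t (k, l)).keys = t.keys := by
  induction l generalizing t with
  | nil => rfl
  | cons s l ih =>
    have hk : k ∈ t.keys := h (by simp)
    have hstep : pvUpdA v t (k, s :: l) =
        pvUpdA v (if (t.getD k PySem.Dict.empty).contains s then t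
          else t.insert k ((t.getD k PySem.Dict.empty).insert s v)) (k, l) := rfl
    have hkeys : (if (t.getD k PySem.Dict.empty).contains s then t
        else t.insert k ((t.getD k PySem.Dict.empty).insert s v)).keys = t.keys := by
      split
      · rfl
      · exact PySem.Dict.keys_insert_of_contains _ _
          ((PySem.Dict.contains_iff_mem_keys _ _).mpr hk)
    rw [hstep, ih _ (fun _ => by rw [hkeys]; exact hk), hkeys]

lemma pv_keys_dataFold (v : Int) (data : List (String × List String))
    (t : PySem.Dict String (PySem.Dict String Int))
    (h : ∀ p ∈ data, p.2 ≠ ([] : List String) → p.1 ∈ t.keys) :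
    (data.foldl (pvUpdA v) t).keys = t.keys := by
  induction data generalizing t with
  | nil => rfl
  | cons q rest ih =>
    obtain ⟨k, l⟩ := q
    have hk := pv_keys_updA v t k l (h (k, l) (by simp))
    rw [List.foldl_cons, ih _ (fun p hp hne => by rw [hk]; exact h p (by simp [hp]) hne), hk]

lemma pv_keys_mainFold (history : List (String × List (String × List String))) (L : List String)
    (t : PySem.Dict String (PySem.Dict String Int)) (c : Int)
    (h : ∀ a ∈ L, ∀ p ∈ ((PySem.Dict.mk history).get? a).getD [], p.2 ≠ ([] : List String) → p.1 ∈ t.keys) :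
    ((L.foldl (fun (st : PySem.Dict String (PySem.Dict String Int) × Int) a =>
        ((((PySem.Dict.mk history).get? a).getD []).foldl (pvUpdA st.2) st.1, st.2 + 1)) (t, c)).1).keys = t.keys := by
  induction L generalizing t c with
  | nil => rfl
  | cons a L ih =>
    have hk := pv_keys_dataFold c _ t (h a (by simp))
    rw [List.foldl_cons, ih _ _ (fun a' ha' p hp hne => by rw [hk]; exact h a' (by simp [ha']) p hp hne), hk]

lemma pv_keys_defaultFold (v : Int) (students : List String) (gl : List String)
    (t : PySem.Dict String (PySem.Dict String Int))
    (h : ∀ g ∈ gl, students ≠ [] → g ∈ t.keys) :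
    (gl.foldl (fun t g' => pvUpdA v t (g', students)) t).keys = t.keys := by
  induction gl generalizing t with
  | nil => rfl
  | cons g' gl ih =>
    have hk := pv_keys_updA v t g' students (h g' (by simp))
    rw [List.foldl_cons, ih _ (fun g hg hne => by rw [hk]; exact h g (by simp [hg]) hne), hk]

-- value of a fold of inserts whose value depends only on the key
lemma pv_getD_foldl_insert_fun {v2 : Type} (f : String → v2) (gl : List String)
    (d : PySem.Dict String v2) (g : String) (dflt : v2) :
    (gl.foldl (fun d x => d.insert x (f x)) d).getD g dflt =
      if g ∈ gl then f g else d.getD g dflt := by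
  induction gl generalizing d with
  | nil => simp
  | cons x gl ih =>
    rw [List.foldl_cons, ih]
    by_cases hmem : g ∈ gl
    · simp [hmem]
    · by_cases hx : g = x
      · subst hx; simp [hmem, PySem.Dict.getD_insert_self]
      · simp [hmem, hx, PySem.Dict.getD_insert_of_ne _ _ _ hx]

-- ===== VERDICT (by name: the statement is the Claim_ definition above) =====
theorem calculate_tslg_spec : Claim_equal_calculate_tslg := by
  intro assignments history graders students _hdom hpre
  obtain ⟨hp1, hp2, hh⟩ := hpre
  unfold Spec_calculate_tslg calculate_tslg calculate_tslg_alt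
  rw [PySem.List.slice?_none_none_neg_one]
  simp only [Option.getD_some]
  -- shared names
  set tslg0 : PySem.Dict String (PySem.Dict String Int) :=
    graders.foldl (fun t g => t.insert g PySem.Dict.empty) PySem.Dict.empty with htslg0
  have hkeys0 : tslg0.keys = PySem.Set.ofList graders := by
    rw [htslg0, PySem.Dict.keys_foldl_insert]
    simp [PySem.Set.update_nil_left]
  have hg0 : ∀ g ∈ graders, g ∈ tslg0.keys := by
    intro g hg; rw [hkeys0]; exact (PySem.Set.mem_ofList _ _).mpr hg
  set st := assignments.reverse.foldl
    (fun (st : PySem.Dict String (PySem.Dict String Int) × Int) a =>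
      let data := ((PySem.Dict.mk history).get? a).getD []
      (data.foldl (pvUpdA st.2) st.1, st.2 + 1)) (tslg0, (1 : Int)) with hst
  have hstep : st = assignments.reverse.foldl
      (fun (st : PySem.Dict String (PySem.Dict String Int) × Int) a =>
        ((((PySem.Dict.mk history).get? a).getD []).foldl (pvUpdA st.2) st.1, st.2 + 1)) (tslg0, (1 : Int)) := rfl
  have hcond : ∀ a ∈ assignments.reverse, ∀ p ∈ ((PySem.Dict.mk history).get? a).getD [],
      p.2 ≠ ([] : List String) → p.1 ∈ tslg0.keys := by
    intro a ha p hp hne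
    rcases hp2 a (List.mem_reverse.mp ha) p hp with h | h
    · exact hg0 _ h
    · exact absurd h hne
  have hc : st.2 = 1 + (assignments.reverse.length : Int) := by rw [hstep]; exact pv_main_snd ..
  have hkeys1 : st.1.keys = tslg0.keys := by rw [hstep]; exact pv_keys_mainFold _ _ _ _ hcond
  set tslg2 := graders.foldl (fun t g => pvUpdA (st.2 + 1) t (g, students)) st.1 with htslg2
  have hkeys2 : tslg2.keys = tslg0.keys := by
    rw [htslg2, pv_keys_defaultFold _ _ _ _ (fun g hg _ => by rw [hkeys1]; exact hg0 g hg)]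
    exact hkeys1
  have hnodup2 : tslg2.keys.Nodup := by rw [hkeys2, hkeys0]; exact PySem.Set.nodup_ofList _
  -- outer B dict
  set outer := graders.foldl (fun d g => d.insert g (pvRow assignments history students g))
    (PySem.Dict.empty : PySem.Dict String (List (String × Int))) with houter
  have hkeysB : outer.keys = PySem.Set.ofList graders := by
    rw [houter, PySem.Dict.keys_foldl_insert]
    simp [PySem.Set.update_nil_left]
  have hnodupB : outer.keys.Nodup := by rw [hkeysB]; exact PySem.Set.nodup_ofList _
  rw [PySem.Dict.items_eq_map_keys tslg2 hnodup2 PySem.Dict.empty,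
      PySem.Dict.items_eq_map_keys outer hnodupB ([] : List (String × Int)),
      hkeys2, hkeys0, hkeysB, List.map_map]
  refine List.map_congr_left ?_
  intro g hgset
  have hg : g ∈ graders := (PySem.Set.mem_ofList _ _).mp hgset
  have houterg : outer.getD g [] = pvRow assignments history students g := by
    rw [houter, pv_getD_foldl_insert_fun]
    simp [hg]
  have h0 : tslg0.getD g PySem.Dict.empty = PySem.Dict.empty := by
    rw [htslg0, pv_getD_foldl_insert_fun]
    simp [PySem.Dict.getD_empty]
  have h1 : st.1.getD g PySem.Dict.empty =
      (PySem.List.enumerate assignments.reverse 0).foldl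
        (fun inn ja => (pvListOf history ja.2 g).foldl (fun i s => i.setdefault s (ja.1 + 1)) inn)
        PySem.Dict.empty := by
    rw [hstep]
    rw [pv_getD_mainFold history hh assignments.reverse 1 tslg0 g]
    norm_num [h0]
  have h2 : tslg2.getD g PySem.Dict.empty =
      students.foldl (fun inn s => inn.setdefault s (st.2 + 1)) (st.1.getD g PySem.Dict.empty) := by
    rw [htslg2, pv_getD_defaultFold]
    simp [hg]
  have hv : st.2 + 1 = (assignments.length : Int) + 2 := by
    rw [hc, List.length_reverse]; ring
  simp only [Function.comp_apply, houterg, h2, h1, hv, pvRow]
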